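-- pv_equiv track=rewrite | github.com/AlexGidman/AoC-2020 | Day11/Day11.py | check_right_up_diagonal
-- ===== SOURCE A (Python) =====
-- def check_right_up_diagonal(row, column, seating, width, height) -> int:
--     if row == 0 or column == width:
--         return 0
--     if seating[row-1][column+1] == '#':
--         return 1
--     if seating[row-1][column+1] == 'L':
--         return 0
--     row -= 1
--     column += 1
--     return check_right_up_diagonal(row, column, seating, width, height)
-- ===== SOURCE B (Python) =====
-- def check_right_up_diagonal(row, column, seating, width, height) -> int:
--     steps = min(row, width - column)
--     ray = [seating[row - k][column + k] for k in range(1, steps + 1)]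
--     for cell in ray:
--         if cell == '#':
--             return 1
--         if cell == 'L':
--             return 0
--     return 0
-- ===== Notes on version B (the rewrite author's own statement) =====
-- stated objective: idiomatic
-- what changed: Replaces the guarded tail recursion with a direct computation: the number of diagonal steps min(row, width-column) is computed up front, the ray of cells is materialised as a comprehension, and a single loop returns on the first '#' or 'L'.
-- outside the precondition, e.g. on check_right_up_diagonal(1, 5, [['x', 'x', 'x', 'x', 'x', 'x', '#']], 3, 1): A returns 1, B returns 0
import Mathlib
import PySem

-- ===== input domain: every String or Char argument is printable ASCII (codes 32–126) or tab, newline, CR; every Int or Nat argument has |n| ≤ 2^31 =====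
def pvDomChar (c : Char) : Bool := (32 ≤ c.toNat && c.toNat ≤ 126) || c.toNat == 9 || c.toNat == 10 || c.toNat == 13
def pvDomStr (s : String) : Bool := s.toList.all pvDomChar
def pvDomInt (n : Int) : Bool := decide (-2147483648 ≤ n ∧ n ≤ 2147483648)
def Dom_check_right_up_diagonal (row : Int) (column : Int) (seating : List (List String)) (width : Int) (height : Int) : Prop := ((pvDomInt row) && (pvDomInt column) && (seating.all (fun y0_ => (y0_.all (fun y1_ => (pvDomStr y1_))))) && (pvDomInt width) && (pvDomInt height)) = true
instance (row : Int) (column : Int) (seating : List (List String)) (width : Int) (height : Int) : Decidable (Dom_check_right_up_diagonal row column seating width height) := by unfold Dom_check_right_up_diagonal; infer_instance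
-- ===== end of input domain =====

-- B replaces A's guarded tail recursion by materialising the diagonal ray (a comprehension over
-- min(row, width-column) steps) and scanning it once for the first '#'/'L'; same cost, more direct.

-- ===== PORT A =====
-- Literal transliteration of A's tail recursion; pyGet? = none is Python's IndexError
-- (those inputs are outside Pre_, where the returned 0 is never claimed).
def check_right_up_diagonal (row : Int) (column : Int) (seating : List (List String)) (width : Int) (height : Int) : Int :=
  if row = 0 ∨ column = width then 0
  else
    match h : PySem.List.pyGet? seating (row - 1) with
    | none => 0
    | some r =>
      match PySem.List.pyGet? r (column + 1) with
      | none => 0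
      | some cell =>
        if cell = "#" then 1
        else if cell = "L" then 0
        else check_right_up_diagonal (row - 1) (column + 1) seating width height
termination_by (row + seating.length).toNat
decreasing_by
  have hne : PySem.List.pyGet? seating (row - 1) ≠ none := by simp [h]
  have hr : PySem.Raise.InRange seating.length (row - 1) := by
    by_contra hc
    exact hne ((PySem.List.pyGet?_eq_none_iff seating (row - 1)).mpr hc)
  simp [PySem.Raise.InRange] at hr
  omega

-- ===== PORT B =====
-- scan of the materialised ray: first '#' gives 1, first 'L' gives 0, exhausted ray gives 0
def scanRay : List String → Int
  | [] => 0
  | c :: cs => if c = "#" then 1 else if c = "L" then 0 else scanRay cs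

def check_right_up_diagonal_alt (row : Int) (column : Int) (seating : List (List String)) (width : Int) (height : Int) : Int :=
  let steps := min row (width - column)
  let ray := (PySem.List.pyRange 1 (steps + 1) 1).map (fun k =>
    PySem.List.pyGetD (PySem.List.pyGetD seating (row - k) []) (column + k) "")
  scanRay ray

-- ===== PRECONDITION & SPEC =====
-- Pre_ restricts to coordinates inside the seating rectangle (plus the two immediate-return guards,
-- on which no indexing happens): outside it A raises IndexError on most inputs, and where it still
-- returns a value that value comes from accidental negative-index wraparound or from scanning past
-- the `column == width` sentinel, behaviour no caller of this AoC grid helper relies on.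
def Pre_check_right_up_diagonal (row : Int) (column : Int) (seating : List (List String)) (width : Int) (height : Int) : Prop :=
  (row = 0 ∨ column = width) ∨
  (0 ≤ row ∧ row ≤ seating.length ∧ 0 ≤ column ∧ column ≤ width ∧
    ∀ r ∈ seating, width < (r.length : Int))
instance (row : Int) (column : Int) (seating : List (List String)) (width : Int) (height : Int) : Decidable (Pre_check_right_up_diagonal row column seating width height) := by unfold Pre_check_right_up_diagonal; infer_instance

def pvWitness_check_right_up_diagonal : Int × Int × List (List String) × Int × Int :=
  (1, 0, [["L", "."]], 1, 1)

def Spec_check_right_up_diagonal (row : Int) (column : Int) (seating : List (List String)) (width : Int) (height : Int) (out : Int) : Prop := out = check_right_up_diagonal_alt row column seating width height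
instance (row : Int) (column : Int) (seating : List (List String)) (width : Int) (height : Int) (out : Int) : Decidable (Spec_check_right_up_diagonal row column seating width height out) := by unfold Spec_check_right_up_diagonal; infer_instance

-- ===== CLAIM (what is proved, stated in full; the proofs are below) =====
def Claim_equal_check_right_up_diagonal : Prop := ∀ (row : Int) (column : Int) (seating : List (List String)) (width : Int) (height : Int), Dom_check_right_up_diagonal row column seating width height → Pre_check_right_up_diagonal row column seating width height → Spec_check_right_up_diagonal row column seating width height (check_right_up_diagonal row column seating width height)

-- ===== LEMMAS AND PROOFS =====

lemma alt_unfold (row column : Int) (seating : List (List String)) (width height : Int) :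
    check_right_up_diagonal_alt row column seating width height =
      scanRay ((PySem.List.pyRange 1 (min row (width - column) + 1) 1).map (fun k =>
        PySem.List.pyGetD (PySem.List.pyGetD seating (row - k) []) (column + k) "")) := rfl

lemma alt_zero_of_steps_nonpos (row column : Int) (seating : List (List String)) (width height : Int)
    (h : min row (width - column) ≤ 0) :
    check_right_up_diagonal_alt row column seating width height = 0 := by
  rw [alt_unfold, PySem.List.pyRange_one_eq_nil (by omega), List.map_nil, scanRay]

lemma A_step (row column : Int) (seating : List (List String)) (width height : Int)
    (r : List String) (cell : String)
    (hg : ¬(row = 0 ∨ column = width))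
    (hA : PySem.List.pyGet? seating (row - 1) = some r)
    (hB : PySem.List.pyGet? r (column + 1) = some cell) :
    check_right_up_diagonal row column seating width height =
      (if cell = "#" then 1 else if cell = "L" then 0
       else check_right_up_diagonal (row - 1) (column + 1) seating width height) := by
  rw [check_right_up_diagonal, if_neg hg]
  split
  · simp_all
  · rename_i r' hA'
    rw [hA] at hA'
    cases hA'
    split
    · simp_all
    · rename_i cell' hB'
      rw [hB] at hB'
      cases hB'
      rfl

lemma alt_cons (row column : Int) (seating : List (List String)) (width height : Int)
    (hrow : 1 ≤ row) (hlen : row ≤ (seating.length : Int)) (hc0 : 0 ≤ column) (hcw : column < width) :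
    check_right_up_diagonal_alt row column seating width height =
      (if (seating.getD (row - 1).toNat []).getD (column + 1).toNat "" = "#" then 1
       else if (seating.getD (row - 1).toNat []).getD (column + 1).toNat "" = "L" then 0
       else check_right_up_diagonal_alt (row - 1) (column + 1) seating width height) := by
  have hM0 : (0:Int) ≤ min (row - 1) (width - column - 1) := by omega
  have hts : (min row (width - column) + 1 - 1).toNat
      = (min (row - 1) (width - column - 1)).toNat + 1 := by omega
  have hts2 : (min (row - 1) (width - (column + 1)) + 1 - 1).toNat
      = (min (row - 1) (width - column - 1)).toNat := by omega
  rw [alt_unfold, alt_unfold, PySem.List.pyRange_one, PySem.List.pyRange_one, hts, hts2,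
    List.range_succ_eq_map]
  simp only [List.map_cons, List.map_map, Nat.cast_zero, add_zero]
  rw [scanRay]
  have hcell : PySem.List.pyGetD (PySem.List.pyGetD seating (row - 1) []) (column + 1) ""
      = (seating.getD (row - 1).toNat []).getD (column + 1).toNat "" := by
    rw [PySem.List.pyGetD_of_nonneg _ "" (show (0:Int) ≤ column + 1 by omega),
      PySem.List.pyGetD_of_nonneg seating [] (show (0:Int) ≤ row - 1 by omega)]
  have htail : ∀ (k : Nat),
      ((fun k => PySem.List.pyGetD (PySem.List.pyGetD seating (row - k) []) (column + k) "") ∘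
        (fun k : Nat => (1 : Int) + (k : Int)) ∘ (fun k : Nat => k + 1)) k
      = ((fun k => PySem.List.pyGetD (PySem.List.pyGetD seating (row - 1 - k) []) (column + 1 + k) "") ∘
        (fun k : Nat => (1 : Int) + (k : Int))) k := by
    intro k
    simp only [Function.comp_apply]
    have e1 : row - (1 + ((k + 1 : Nat) : Int)) = row - 1 - (1 + (k : Int)) := by push_cast; ring
    have e2 : column + (1 + ((k + 1 : Nat) : Int)) = column + 1 + (1 + (k : Int)) := by
      push_cast; ring
    rw [e1, e2]
  rw [List.map_congr_left (fun k _ => htail k)]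
  rw [hcell]

lemma key (n : Nat) : ∀ (row column : Int) (seating : List (List String)) (width height : Int),
    row = (n : Int) → row ≤ seating.length → 0 ≤ column → column ≤ width →
    (∀ r ∈ seating, width < (r.length : Int)) →
    check_right_up_diagonal row column seating width height =
      check_right_up_diagonal_alt row column seating width height := by
  induction n with
  | zero =>
    intro row column seating width height hrow _ _ hcw _
    subst hrow
    rw [check_right_up_diagonal]
    simp only [Nat.cast_zero, true_or, if_true]
    exact (alt_zero_of_steps_nonpos 0 column seating width height (by omega)).symm
  | succ n ih =>
    intro row column seating width height hrow hlen hc0 hcw hrows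
    by_cases hcweq : column = width
    · subst hcweq
      rw [check_right_up_diagonal]
      rw [if_pos (Or.inr rfl)]
      exact (alt_zero_of_steps_nonpos row column seating column height (by omega)).symm
    · have hrow1 : (1:Int) ≤ row := by omega
      have hr2 : row - 1 < (seating.length : Int) := by omega
      have hrowmem : seating[(row - 1).toNat] ∈ seating := List.getElem_mem (l := seating) (by omega)
      have hcell2 : column + 1 < ((seating[(row - 1).toNat]).length : Int) := by
        have := hrows _ hrowmem
        omega
      have hA : PySem.List.pyGet? seating (row - 1) = some (seating[(row - 1).toNat]) :=
        PySem.List.pyGet?_eq_some_getElem seating (by omega) hr2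
      have hB : PySem.List.pyGet? (seating[(row - 1).toNat]) (column + 1)
          = some ((seating[(row - 1).toNat])[(column + 1).toNat]) :=
        PySem.List.pyGet?_eq_some_getElem _ (by omega) hcell2
      rw [A_step row column seating width height _ _ (by push Not; exact ⟨by omega, hcweq⟩) hA hB]
      rw [alt_cons row column seating width height hrow1 (by omega) hc0 (by omega)]
      have hgd : (seating.getD (row - 1).toNat []).getD (column + 1).toNat ""
          = (seating[(row - 1).toNat])[(column + 1).toNat] := by
        rw [List.getD_eq_getElem seating [] (by omega), List.getD_eq_getElem _ "" (by omega)]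
      rw [hgd]
      by_cases h1 : (seating[(row - 1).toNat])[(column + 1).toNat] = "#"
      · rw [if_pos h1, if_pos h1]
      · rw [if_neg h1, if_neg h1]
        by_cases h2 : (seating[(row - 1).toNat])[(column + 1).toNat] = "L"
        · rw [if_pos h2, if_pos h2]
        · rw [if_neg h2, if_neg h2]
          exact ih (row - 1) (column + 1) seating width height (by omega) (by omega)
            (by omega) (by omega) hrows

-- ===== VERDICT (by name: the statement is the Claim_ definition above) =====
theorem check_right_up_diagonal_spec : Claim_equal_check_right_up_diagonal := by
  intro row column seating width height _ hpre
  unfold Spec_check_right_up_diagonal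
  rcases hpre with hg | ⟨h0, h1, h2, h3, h4⟩
  · rcases hg with h | h
    · subst h
      rw [check_right_up_diagonal]
      rw [if_pos (Or.inl rfl)]
      exact (alt_zero_of_steps_nonpos 0 column seating width height (by omega)).symm
    · subst h
      rw [check_right_up_diagonal]
      rw [if_pos (Or.inr rfl)]
      exact (alt_zero_of_steps_nonpos row column seating column height (by omega)).symm
  · exact key row.toNat row column seating width height (by omega) h1 h2 h3 h4
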